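-- pv_equiv track=rewrite | github.com/SVAIGBA/WMSeg | wmseg_eval.py | eval_sentence
-- ===== SOURCE A (Python) =====
-- def eval_sentence(y_pred, y, sentence, word2id):
--     words = sentence.split(' ')
--     seg_pred = []
--     word_pred = ''
--
--     if y is not None:
--         word_true = ''
--         seg_true = []
--         for i in range(len(y)):
--             word_true += words[i]
--             if y[i] in ['S', 'E']:
--                 if word_true not in word2id:
--                     word_true = '*' + word_true + '*'
--                 seg_true.append(word_true)
--                 word_true = ''
--         seg_true_str = ' '.join(seg_true)
--     else:
--         seg_true_str = None
--
--     for i in range(len(y_pred)):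
--         word_pred += words[i]
--         if y_pred[i] in ['S', 'E']:
--             seg_pred.append(word_pred)
--             word_pred = ''
--     seg_pred_str = ' '.join(seg_pred)
--     return seg_true_str, seg_pred_str
-- ===== SOURCE B (Python) =====
-- def eval_sentence(y_pred, y, sentence, word2id):
--     words = sentence.split(' ')
--
--     def segments(pairs):
--         # recursive chunking: cut off everything up to and including the
--         # first 'S'/'E' label, join those words into one segment, recurse
--         for k, (tag, _) in enumerate(pairs):
--             if tag in ('S', 'E'):
--                 return [''.join(w for _, w in pairs[:k + 1])] + segments(pairs[k + 1:])
--         return []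
--
--     if y is None:
--         seg_true_str = None
--     else:
--         seg_true_str = ' '.join(
--             w if w in word2id else '*' + w + '*'
--             for w in segments(list(zip(y, words))))
--     seg_pred_str = ' '.join(segments(list(zip(y_pred, words))))
--     return seg_true_str, seg_pred_str
-- ===== Notes on version B (the rewrite author's own statement) =====
-- stated objective: alternative
-- what changed: B replaces A's two index-driven accumulator loops (word_true/word_pred built up character-group by character-group with a flush at each 'S'/'E') by a recursive chunking of the zipped (label, word) list: find the first 'S'/'E' boundary, join that prefix of words into one segment, recurse on the remainder, and apply the '*...*' wrapping afterwards by a map over the segments.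
import Mathlib
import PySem

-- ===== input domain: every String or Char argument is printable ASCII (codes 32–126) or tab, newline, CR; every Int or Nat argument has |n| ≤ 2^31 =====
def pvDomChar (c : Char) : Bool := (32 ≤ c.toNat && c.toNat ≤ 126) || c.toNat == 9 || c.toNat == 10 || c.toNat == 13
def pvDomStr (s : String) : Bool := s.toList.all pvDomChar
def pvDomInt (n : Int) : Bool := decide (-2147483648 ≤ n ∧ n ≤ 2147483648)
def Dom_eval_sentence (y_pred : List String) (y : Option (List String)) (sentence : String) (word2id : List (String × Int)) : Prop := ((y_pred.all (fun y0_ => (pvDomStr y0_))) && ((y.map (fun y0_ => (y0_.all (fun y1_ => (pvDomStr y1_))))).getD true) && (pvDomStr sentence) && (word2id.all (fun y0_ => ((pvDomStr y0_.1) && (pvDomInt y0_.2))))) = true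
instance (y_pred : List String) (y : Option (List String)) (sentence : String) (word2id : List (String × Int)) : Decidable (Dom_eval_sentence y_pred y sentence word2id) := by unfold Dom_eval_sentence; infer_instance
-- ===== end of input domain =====

-- B replaces A's index-driven accumulator loops by a recursive chunking of the zipped
-- (label, word) list at the 'S'/'E' boundaries; objective: alternative decomposition.

-- ===== PORT A =====
-- Literal transliteration of A: words = sentence.split(' '); two for-i-in-range loops
-- carrying (current word, collected segments).  words[i] is ported as List.getD: under
-- Pre_eval_sentence every accessed index is in range, so getD is exact there.
def eval_sentence (y_pred : List String) (y : Option (List String)) (sentence : String) (word2id : List (String × Int)) : Option String × String :=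
  let words := (PySem.Str.split? sentence " ").getD []   -- sep ≠ "", so split? is some: exact
  let seg_true_str : Option String :=
    match y with
    | some ys =>
        let st := (List.range ys.length).foldl
          (fun (st : String × List String) i =>
            let word_true := st.1 ++ words.getD i ""
            if ys.getD i "" == "S" || ys.getD i "" == "E" then
              let word_true :=
                if !(word2id.any (fun p => p.1 == word_true)) then "*" ++ word_true ++ "*"
                else word_true
              ("", st.2 ++ [word_true])
            else (word_true, st.2)) ("", [])
        some (PySem.Str.join " " st.2)
    | none => none
  let sp := (List.range y_pred.length).foldl
    (fun (st : String × List String) i =>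
      let word_pred := st.1 ++ words.getD i ""
      if y_pred.getD i "" == "S" || y_pred.getD i "" == "E" then
        ("", st.2 ++ [word_pred])
      else (word_pred, st.2)) ("", [])
  (seg_true_str, PySem.Str.join " " sp.2)

-- ===== PORT B =====
-- B's helper 'segments': scan for the first 'S'/'E' label, join the words up to and
-- including it into one segment, recurse on the rest; labels after the last boundary
-- contribute nothing.
def pvSegments (pairs : List (String × String)) : List String :=
  match h : pairs.findIdx? (fun p => p.1 == "S" || p.1 == "E") with
  | none => []
  | some k =>
      String.join ((pairs.take (k+1)).map Prod.snd) :: pvSegments (pairs.drop (k+1))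
termination_by pairs.length
decreasing_by
  cases pairs with
  | nil => simp at h
  | cons a l => simp only [List.length_drop, List.length_cons]; omega

def eval_sentence_alt (y_pred : List String) (y : Option (List String)) (sentence : String) (word2id : List (String × Int)) : Option String × String :=
  let words := (PySem.Str.split? sentence " ").getD []   -- sep ≠ "", so split? is some: exact
  let seg_true_str : Option String :=
    match y with
    | none => none
    | some ys =>
        some (PySem.Str.join " " ((pvSegments (ys.zip words)).map
          (fun w => if word2id.any (fun p => p.1 == w) then w else "*" ++ w ++ "*")))
  (seg_true_str, PySem.Str.join " " (pvSegments (y_pred.zip words)))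

-- ===== PRECONDITION & SPEC =====
-- Pre_ excludes exactly the inputs on which A raises IndexError: a true or predicted
-- label sequence longer than the space-split word list makes A read words[i] past the end.
def Pre_eval_sentence (y_pred : List String) (y : Option (List String)) (sentence : String) (word2id : List (String × Int)) : Prop :=
  (y.getD []).length ≤ ((PySem.Str.split? sentence " ").getD []).length ∧
  y_pred.length ≤ ((PySem.Str.split? sentence " ").getD []).length
instance (y_pred : List String) (y : Option (List String)) (sentence : String) (word2id : List (String × Int)) : Decidable (Pre_eval_sentence y_pred y sentence word2id) := by
  unfold Pre_eval_sentence; infer_instance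
def pvWitness_eval_sentence : List String × Option (List String) × String × (List (String × Int)) :=
  (["B", "E"], some (["S", "S"]), "ab cd", [("ab", 0)])

def Spec_eval_sentence (y_pred : List String) (y : Option (List String)) (sentence : String) (word2id : List (String × Int)) (out : Option String × String) : Prop := out = eval_sentence_alt y_pred y sentence word2id
instance (y_pred : List String) (y : Option (List String)) (sentence : String) (word2id : List (String × Int)) (out : Option String × String) : Decidable (Spec_eval_sentence y_pred y sentence word2id out) := by unfold Spec_eval_sentence; infer_instance

-- ===== CLAIM (what is proved, stated in full; the proofs are below) =====
def Claim_equal_eval_sentence : Prop := ∀ (y_pred : List String) (y : Option (List String)) (sentence : String) (word2id : List (String × Int)), Dom_eval_sentence y_pred y sentence word2id → Pre_eval_sentence y_pred y sentence word2id → Spec_eval_sentence y_pred y sentence word2id (eval_sentence y_pred y sentence word2id)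

-- ===== LEMMAS AND PROOFS =====

theorem pv_join_cons (w : String) (l : List String) :
    String.join (w :: l) = w ++ String.join l := by
  show List.foldl (· ++ ·) w l = w ++ List.foldl (· ++ ·) "" l
  induction l generalizing w with
  | nil => simp [List.foldl]
  | cons a l ih =>
      simp only [List.foldl]
      rw [ih (w ++ a), ih ("" ++ a)]
      simp [String.append_assoc]

theorem pvSegments_eq_nil (pairs : List (String × String))
    (hfi : pairs.findIdx? (fun p => p.1 == "S" || p.1 == "E") = none) :
    pvSegments pairs = [] := by
  rw [pvSegments]
  split
  · rfl
  · rename_i k h; rw [hfi] at h; exact absurd h (by simp)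

theorem pvSegments_eq_cons (pairs : List (String × String)) (k : Nat)
    (hfi : pairs.findIdx? (fun p => p.1 == "S" || p.1 == "E") = some k) :
    pvSegments pairs
      = String.join ((pairs.take (k+1)).map Prod.snd) :: pvSegments (pairs.drop (k+1)) := by
  rw [pvSegments]
  split
  · rename_i h; rw [hfi] at h; exact absurd h (by simp)
  · rename_i k' h; rw [hfi] at h; injection h with h; subst h; rfl

-- structural characterisation of B's chunking, used for the induction
theorem pvSegments_cons (t w : String) (rest : List (String × String)) :
    pvSegments ((t, w) :: rest) =
      if t == "S" || t == "E" then w :: pvSegments rest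
      else match pvSegments rest with
           | [] => []
           | c :: cs => (w ++ c) :: cs := by
  by_cases hb : (t == "S" || t == "E") = true
  · rw [pvSegments_eq_cons ((t,w)::rest) 0 (by simp [List.findIdx?_cons, hb])]
    simp [hb, String.join]
  · cases hfi : rest.findIdx? (fun p => p.1 == "S" || p.1 == "E") with
    | none =>
        rw [pvSegments_eq_nil ((t,w)::rest) (by simp [List.findIdx?_cons, hb, hfi]),
          pvSegments_eq_nil rest hfi]
        simp [hb]
    | some k =>
        rw [pvSegments_eq_cons ((t,w)::rest) (k+1) (by simp [List.findIdx?_cons, hb, hfi]),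
          pvSegments_eq_cons rest k hfi]
        simp [hb, pv_join_cons]

-- accumulator form of pvSegments (the shape of A's loop state)
def pvSegsAux (acc : String) : List (String × String) → List String
  | [] => []
  | (t, w) :: rest =>
      if t == "S" || t == "E" then (acc ++ w) :: pvSegsAux "" rest
      else pvSegsAux (acc ++ w) rest

theorem pvSegsAux_eq (pairs : List (String × String)) :
    ∀ acc, pvSegsAux acc pairs =
      match pvSegments pairs with
      | [] => []
      | c :: cs => (acc ++ c) :: cs := by
  induction pairs with
  | nil =>
      intro acc
      rw [pvSegments_eq_nil [] (by simp)]
      rfl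
  | cons p rest ih =>
      intro acc
      obtain ⟨t, w⟩ := p
      rw [pvSegments_cons]
      by_cases hb : (t == "S" || t == "E") = true
      · simp only [pvSegsAux, hb, if_true]
        rw [ih ""]
        cases pvSegments rest with
        | nil => simp
        | cons c cs => simp
      · simp only [pvSegsAux, hb, Bool.false_eq_true, if_false]
        rw [ih (acc ++ w)]
        cases pvSegments rest with
        | nil => simp
        | cons c cs => simp [String.append_assoc]

theorem pvSegsAux_nil_acc (pairs : List (String × String)) :
    pvSegsAux "" pairs = pvSegments pairs := by
  rw [pvSegsAux_eq pairs ""]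
  cases h : pvSegments pairs with
  | nil => rfl
  | cons c cs => simp

-- loop invariant: A's accumulator fold collects f applied to each segment
theorem pv_fold_segs (f : String → String) :
    ∀ (pairs : List (String × String)) (acc : String) (segs : List String),
      (pairs.foldl
        (fun (st : String × List String) p =>
          if p.1 == "S" || p.1 == "E" then ("", st.2 ++ [f (st.1 ++ p.2)])
          else (st.1 ++ p.2, st.2))
        (acc, segs)).2 = segs ++ (pvSegsAux acc pairs).map f := by
  intro pairs
  induction pairs with
  | nil => intro acc segs; simp [pvSegsAux]
  | cons p rest ih =>
      intro acc segs
      obtain ⟨t, w⟩ := p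
      by_cases hb : (t == "S" || t == "E") = true
      · simp only [List.foldl_cons, hb, if_true, pvSegsAux]
        rw [ih "" (segs ++ [f (acc ++ w)])]
        simp
      · simp only [List.foldl_cons, hb, Bool.false_eq_true, if_false, pvSegsAux]
        rw [ih (acc ++ w) segs]

-- A's for-i-in-range loop over two index-read lists is the fold over their zip
theorem pv_range_fold_zip {σ : Type} (step : σ → String → String → σ) :
    ∀ (ys ws : List String), ys.length ≤ ws.length → ∀ (s : σ),
      (List.range ys.length).foldl (fun st i => step st (ys.getD i "") (ws.getD i "")) s
        = (ys.zip ws).foldl (fun st p => step st p.1 p.2) s := by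
  intro ys
  induction ys with
  | nil => intro ws h s; simp
  | cons t ys' ih =>
      intro ws h s
      cases ws with
      | nil => simp at h
      | cons w ws' =>
          simp only [List.length_cons, List.range_succ_eq_map, List.foldl_cons,
            List.foldl_map, List.getD_cons_succ, List.getD_cons_zero, List.zip_cons_cons]
          exact ih ws' (by simpa using h) (step s t w)

-- one of A's loops (for one label list and wrap function f) equals B's mapped segments
theorem pv_side (labels ws : List String) (h : labels.length ≤ ws.length)
    (f : String → String) :
    ((List.range labels.length).foldl
      (fun (st : String × List String) i =>
        if labels.getD i "" == "S" || labels.getD i "" == "E" then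
          ("", st.2 ++ [f (st.1 ++ ws.getD i "")])
        else (st.1 ++ ws.getD i "", st.2)) ("", [])).2
      = (pvSegments (labels.zip ws)).map f := by
  rw [pv_range_fold_zip
    (fun st t w => if t == "S" || t == "E" then ("", st.2 ++ [f (st.1 ++ w)])
                   else (st.1 ++ w, st.2)) labels ws h]
  rw [pv_fold_segs f (labels.zip ws) "" []]
  rw [pvSegsAux_nil_acc]
  simp

theorem pv_main (y_pred : List String) (y : Option (List String)) (sentence : String) (word2id : List (String × Int))
    (hy : (y.getD []).length ≤ ((PySem.Str.split? sentence " ").getD []).length)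
    (hp : y_pred.length ≤ ((PySem.Str.split? sentence " ").getD []).length) :
    eval_sentence y_pred y sentence word2id = eval_sentence_alt y_pred y sentence word2id := by
  have hpred :
      ((List.range y_pred.length).foldl
        (fun (st : String × List String) i =>
          if y_pred.getD i "" == "S" || y_pred.getD i "" == "E" then
            ("", st.2 ++ [st.1 ++ ((PySem.Str.split? sentence " ").getD []).getD i ""])
          else (st.1 ++ ((PySem.Str.split? sentence " ").getD []).getD i "", st.2)) ("", [])).2
        = pvSegments (y_pred.zip ((PySem.Str.split? sentence " ").getD [])) := by
    simpa using pv_side y_pred ((PySem.Str.split? sentence " ").getD []) hp (fun w => w)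
  cases y with
  | none =>
      exact congrArg (fun l => ((none : Option String), PySem.Str.join " " l)) hpred
  | some ys =>
      have htrue :
          ((List.range ys.length).foldl
            (fun (st : String × List String) i =>
              if ys.getD i "" == "S" || ys.getD i "" == "E" then
                ("", st.2 ++ [if !(word2id.any (fun p => p.1 == st.1 ++ ((PySem.Str.split? sentence " ").getD []).getD i "")) then "*" ++ (st.1 ++ ((PySem.Str.split? sentence " ").getD []).getD i "") ++ "*" else st.1 ++ ((PySem.Str.split? sentence " ").getD []).getD i ""])
              else (st.1 ++ ((PySem.Str.split? sentence " ").getD []).getD i "", st.2)) ("", [])).2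
            = (pvSegments (ys.zip ((PySem.Str.split? sentence " ").getD []))).map
                (fun w => if word2id.any (fun p => p.1 == w) then w else "*" ++ w ++ "*") := by
        rw [pv_side ys ((PySem.Str.split? sentence " ").getD []) (by simpa using hy)
          (fun wt => if !(word2id.any (fun p => p.1 == wt)) then "*" ++ wt ++ "*" else wt)]
        apply List.map_congr_left
        intro w _
        cases word2id.any (fun p => p.1 == w) <;> simp
      exact congrArg₂ (fun a b => (some (PySem.Str.join " " a), PySem.Str.join " " b)) htrue hpred

-- ===== VERDICT (by name: the statement is the Claim_ definition above) =====
theorem eval_sentence_spec : Claim_equal_eval_sentence := by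
  intro y_pred y sentence word2id _ hpre
  exact pv_main y_pred y sentence word2id hpre.1 hpre.2
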